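-- pv_equiv track=rewrite | github.com/ed-alvarez/real-bigdata-aws | zoom_ingest/zoom_shared/zoom_utils.py | is_transcript_audio_recordings
-- ===== SOURCE A (Python) =====
-- from typing import Any, List, Optional, Tuple
--
-- def is_transcript_audio_recordings(meet_recordings: list) -> Optional[dict]:
--     _transcript_cloud_recording: list = [
--         recording
--         for recording in meet_recordings
--         if recording["file_extension"] == "VTT"
--     ]
--
--     transcript_cloud_recording: dict = (
--         _transcript_cloud_recording[0] if len(_transcript_cloud_recording) == 1 else {}
--     )
--
--     _audio_cloud_recording: list = [
--         recording
--         for recording in meet_recordings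
--         if recording["file_extension"] == "M4A"
--     ]
--     audio_cloud_recording: dict = (
--         _audio_cloud_recording[0] if len(_audio_cloud_recording) == 1 else {}
--     )
--
--     return transcript_cloud_recording, audio_cloud_recording
-- ===== SOURCE B (Python) =====
-- def is_transcript_audio_recordings(meet_recordings: list):
--     vtt_match = {}
--     vtt_count = 0
--     m4a_match = {}
--     m4a_count = 0
--     for recording in meet_recordings:
--         ext = recording["file_extension"]
--         if ext == "VTT":
--             vtt_match = recording
--             vtt_count += 1
--         elif ext == "M4A":
--             m4a_match = recording
--             m4a_count += 1
--     return (vtt_match if vtt_count == 1 else {},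
--             m4a_match if m4a_count == 1 else {})
-- ===== Notes on version B (the rewrite author's own statement) =====
-- stated objective: alternative
-- what changed: Replaces the two list-comprehension scans (each building a full filtered list, then indexing) with a single pass that reads file_extension once per recording and maintains match/count state for VTT and M4A.
import Mathlib
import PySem

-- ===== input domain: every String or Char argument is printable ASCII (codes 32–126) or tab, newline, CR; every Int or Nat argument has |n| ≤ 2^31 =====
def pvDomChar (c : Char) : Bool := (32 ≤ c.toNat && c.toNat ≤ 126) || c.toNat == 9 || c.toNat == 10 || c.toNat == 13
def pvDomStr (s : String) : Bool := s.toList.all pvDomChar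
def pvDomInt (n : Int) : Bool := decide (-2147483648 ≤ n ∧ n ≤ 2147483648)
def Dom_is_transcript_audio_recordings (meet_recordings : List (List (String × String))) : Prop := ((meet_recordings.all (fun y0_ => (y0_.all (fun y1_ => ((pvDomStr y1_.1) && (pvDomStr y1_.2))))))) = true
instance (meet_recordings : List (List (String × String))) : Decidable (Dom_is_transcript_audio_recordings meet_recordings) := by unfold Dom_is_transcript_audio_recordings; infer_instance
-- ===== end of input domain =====

-- B replaces A's two filtering passes by one loop maintaining match/count state for VTT and M4A;
-- equal return value on every input where A returns (Pre_ excludes recordings missing "file_extension", where both raise KeyError).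
-- ===== PORT A =====
def is_transcript_audio_recordings (meet_recordings : List (List (String × String))) : (List (String × String)) × (List (String × String)) :=
  let tList := meet_recordings.filter (fun r => ((PySem.Dict.mk r).get? "file_extension").getD "" == "VTT")
  let transcript := if tList.length == 1 then tList.headD [] else []
  let aList := meet_recordings.filter (fun r => ((PySem.Dict.mk r).get? "file_extension").getD "" == "M4A")
  let audio := if aList.length == 1 then aList.headD [] else []
  (transcript, audio)

-- ===== PORT B =====
def is_transcript_audio_recordings_alt (meet_recordings : List (List (String × String))) : (List (String × String)) × (List (String × String)) :=
  let s := meet_recordings.foldl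
    (fun (st : (List (String × String)) × Int × (List (String × String)) × Int) r =>
      let ext := ((PySem.Dict.mk r).get? "file_extension").getD ""
      if ext == "VTT" then (r, st.2.1 + 1, st.2.2.1, st.2.2.2)
      else if ext == "M4A" then (st.1, st.2.1, r, st.2.2.2 + 1)
      else st)
    ([], 0, [], 0)
  ((if s.2.1 == 1 then s.1 else []), (if s.2.2.2 == 1 then s.2.2.1 else []))

-- ===== PRECONDITION & SPEC =====
-- Pre_ excludes recordings with no "file_extension" key: there Python A raises KeyError (so does B).
def Pre_is_transcript_audio_recordings (meet_recordings : List (List (String × String))) : Prop :=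
  ∀ r ∈ meet_recordings, ((PySem.Dict.mk r).get? "file_extension").isSome = true
instance (meet_recordings : List (List (String × String))) : Decidable (Pre_is_transcript_audio_recordings meet_recordings) := by unfold Pre_is_transcript_audio_recordings; infer_instance
def pvWitness_is_transcript_audio_recordings : (List (List (String × String))) := [[("file_extension", "VTT")], [("file_extension", "MP4")]]

def Spec_is_transcript_audio_recordings (meet_recordings : List (List (String × String))) (out : (List (String × String)) × (List (String × String))) : Prop := out = is_transcript_audio_recordings_alt meet_recordings
instance (meet_recordings : List (List (String × String))) (out : (List (String × String)) × (List (String × String))) : Decidable (Spec_is_transcript_audio_recordings meet_recordings out) := by unfold Spec_is_transcript_audio_recordings; infer_instance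

-- ===== CLAIM (what is proved, stated in full; the proofs are below) =====
def Claim_equal_is_transcript_audio_recordings : Prop := ∀ (meet_recordings : List (List (String × String))), Dom_is_transcript_audio_recordings meet_recordings → Pre_is_transcript_audio_recordings meet_recordings → Spec_is_transcript_audio_recordings meet_recordings (is_transcript_audio_recordings meet_recordings)

-- ===== LEMMAS AND PROOFS =====

-- B's loop state after folding xs from (m1, c1, m2, c2): each match slot holds the last
-- matching recording (or its initial value) and each count grows by the filtered length.
lemma alt_loop_inv (xs : List (List (String × String))) :
    ∀ (m1 : List (String × String)) (c1 : Int) (m2 : List (String × String)) (c2 : Int),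
    xs.foldl
      (fun (st : (List (String × String)) × Int × (List (String × String)) × Int) r =>
        let ext := ((PySem.Dict.mk r).get? "file_extension").getD ""
        if ext == "VTT" then (r, st.2.1 + 1, st.2.2.1, st.2.2.2)
        else if ext == "M4A" then (st.1, st.2.1, r, st.2.2.2 + 1)
        else st)
      (m1, c1, m2, c2)
    = ((xs.filter (fun r => ((PySem.Dict.mk r).get? "file_extension").getD "" == "VTT")).getLastD m1,
       c1 + (xs.filter (fun r => ((PySem.Dict.mk r).get? "file_extension").getD "" == "VTT")).length,
       (xs.filter (fun r => ((PySem.Dict.mk r).get? "file_extension").getD "" == "M4A")).getLastD m2,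
       c2 + (xs.filter (fun r => ((PySem.Dict.mk r).get? "file_extension").getD "" == "M4A")).length) := by
  induction xs with
  | nil => intro m1 c1 m2 c2; simp
  | cons r t ih =>
    intro m1 c1 m2 c2
    by_cases hv : (((PySem.Dict.mk r).get? "file_extension").getD "" == "VTT") = true
    · have hm : (((PySem.Dict.mk r).get? "file_extension").getD "" == "M4A") = false := by
        simp_all
      simp only [List.foldl_cons, List.filter_cons, hv, hm, Bool.false_eq_true, if_true, if_false]
      rw [ih]
      simp only [List.getLastD_cons, List.length_cons, Prod.mk.injEq, and_true, true_and]
      push_cast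
      omega
    · by_cases hm : (((PySem.Dict.mk r).get? "file_extension").getD "" == "M4A") = true
      · simp only [List.foldl_cons, List.filter_cons, hv, hm, Bool.false_eq_true, if_true, if_false]
        rw [ih]
        simp only [List.getLastD_cons, List.length_cons, Prod.mk.injEq, true_and]
        push_cast
        omega
      · simp only [List.foldl_cons, List.filter_cons, hv, hm, Bool.false_eq_true, if_false]
        exact ih m1 c1 m2 c2

-- selecting the single element: A reads the head of the filtered list, B kept its last match;
-- when the length is exactly 1 they coincide.
lemma select_eq {α : Type} (d : α) (l : List α) :
    (if (l.length == 1) = true then l.headD d else d)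
      = (if ((l.length : Int) == 1) = true then l.getLastD d else d) := by
  by_cases h : l.length = 1
  · obtain ⟨a, rfl⟩ := List.length_eq_one_iff.mp h
    simp
  · have h1 : (l.length == 1) = false := by simp [h]
    have h2 : (((l.length : Int)) == 1) = false := by
      simp only [beq_eq_false_iff_ne, ne_eq]
      intro hc; exact h (by exact_mod_cast hc)
    simp [h1, h2]

-- ===== VERDICT (by name: the statement is the Claim_ definition above) =====
theorem is_transcript_audio_recordings_spec : Claim_equal_is_transcript_audio_recordings := by
  intro xs _ _
  unfold Spec_is_transcript_audio_recordings is_transcript_audio_recordings is_transcript_audio_recordings_alt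
  rw [alt_loop_inv]
  simp only [zero_add, Prod.mk.injEq]
  exact ⟨select_eq [] _, select_eq [] _⟩
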